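-- pv_equiv track=rewrite | github.com/JonathanMortal16/AI-Jonathan-Mercado | 001_Busqueda_grafos/003_Satisfaccion_de_restricciones/002_Busqueda_de_Vuelta_Atrás.py | es_consistente
-- ===== SOURCE A (Python) =====
-- restricciones_vecinos = [
--     ("A", "B"),
--     ("B", "C"),
--     ("A", "C")
-- ]
--
-- def es_consistente(asignacion_actual, var, valor):
--     """
--     Revisa si asignar 'valor' a 'var' respeta TODAS las
--     restricciones con las variables que ya están asignadas.
--
--     asignacion_actual: diccionario parcial, ej: {"A": "Rojo", "B": "Verde"}
--     var: la variable que estoy intentando asignar ahorita, ej: "C"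
--     valor: el valor que quiero darle a esa variable, ej: "Azul"
--     """
--
--     # Recorremos las restricciones binarias (X != Y)
--     for (x, y) in restricciones_vecinos:
--
--         # Caso 1: si la restricción es entre var y otra variable ya asignada
--         if x == var and y in asignacion_actual:
--             # Si la otra variable tiene el mismo valor → conflicto
--             if asignacion_actual[y] == valor:
--                 return False
--
--         if y == var and x in asignacion_actual:
--             if asignacion_actual[x] == valor:
--                 return False
--
--     # Si no rompimos ninguna restricción, es consistente
--     return True
-- ===== SOURCE B (Python) =====
-- restricciones_vecinos = [
--     ("A", "B"),
--     ("B", "C"),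
--     ("A", "C")
-- ]
--
-- _ARISTAS = set(restricciones_vecinos)
--
-- def es_consistente(asignacion_actual, var, valor):
--     # Walk the ASSIGNMENT once instead of the constraint list: reject on the
--     # first already-assigned variable that holds 'valor' and is adjacent to
--     # 'var' (edge in either direction, tested against a precomputed edge set).
--     for vecino, v in asignacion_actual.items():
--         if v == valor and ((var, vecino) in _ARISTAS or (vecino, var) in _ARISTAS):
--             return False
--     return True
-- ===== Notes on version B (the rewrite author's own statement) =====
-- stated objective: alternative
-- what changed: B iterates over the assignment's entries and rejects the first one whose value equals valor and that is adjacent to var in a precomputed edge set, instead of scanning the constraint list and testing both endpoints of every constraint against the dict.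
import Mathlib
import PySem

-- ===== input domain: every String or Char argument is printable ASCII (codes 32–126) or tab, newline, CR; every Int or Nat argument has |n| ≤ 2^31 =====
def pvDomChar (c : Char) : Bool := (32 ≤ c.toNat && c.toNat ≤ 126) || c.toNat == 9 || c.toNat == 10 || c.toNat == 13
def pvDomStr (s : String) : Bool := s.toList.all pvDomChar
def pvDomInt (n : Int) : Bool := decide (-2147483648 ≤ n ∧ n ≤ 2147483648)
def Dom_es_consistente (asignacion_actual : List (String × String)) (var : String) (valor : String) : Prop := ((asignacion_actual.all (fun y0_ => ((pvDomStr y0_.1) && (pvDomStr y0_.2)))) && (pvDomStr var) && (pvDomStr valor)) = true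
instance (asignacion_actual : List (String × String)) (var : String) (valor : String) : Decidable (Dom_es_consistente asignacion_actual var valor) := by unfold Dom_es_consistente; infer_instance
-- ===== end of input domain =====

-- B walks the assignment's entries once and rejects the first entry that holds 'valor'
-- and is adjacent to 'var' in a precomputed edge set, instead of scanning the constraint
-- list and testing both endpoints of every constraint (objective: alternative traversal).

-- ===== PORT A =====
-- module-level constant restricciones_vecinos
def restriccionesVecinos : List (String × String) := [("A", "B"), ("B", "C"), ("A", "C")]

-- the 'for (x, y) in restricciones_vecinos' loop of A, with its two in-order branch pairs
def esConsLoop (asig : PySem.Dict String String) (var valor : String) :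
    List (String × String) → Bool
  | [] => true
  | (x, y) :: rest =>
    if x == var && asig.contains y && (asig.get? y == some valor) then false
    else if y == var && asig.contains x && (asig.get? x == some valor) then false
    else esConsLoop asig var valor rest

def es_consistente (asignacion_actual : List (String × String)) (var : String) (valor : String) : Bool :=
  esConsLoop (PySem.Dict.mk asignacion_actual) var valor restriccionesVecinos

-- ===== PORT B =====
-- _ARISTAS = set(restricciones_vecinos)
def aristas : PySem.Set (String × String) := PySem.Set.ofList restriccionesVecinos

-- '(var, vecino) in _ARISTAS or (vecino, var) in _ARISTAS'
def esArista (var vecino : String) : Bool :=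
  aristas.contains (var, vecino) || aristas.contains (vecino, var)

-- the 'for vecino, v in asignacion_actual.items()' loop; items() is ported by hand over the
-- association list: a key's value is its FIRST occurrence, so later occurrences of a key
-- already seen are skipped (exact for the dict the list represents).
def esConsAltLoop (var valor : String) (seen : PySem.Set String) :
    List (String × String) → Bool
  | [] => true
  | (vecino, v) :: rest =>
    if seen.contains vecino then esConsAltLoop var valor seen rest
    else if v == valor && esArista var vecino then false
    else esConsAltLoop var valor (PySem.Set.add seen vecino) rest

def es_consistente_alt (asignacion_actual : List (String × String)) (var : String) (valor : String) : Bool :=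
  esConsAltLoop var valor PySem.Set.empty asignacion_actual

-- ===== PRECONDITION & SPEC =====
def Spec_es_consistente (asignacion_actual : List (String × String)) (var : String) (valor : String) (out : Bool) : Prop := out = es_consistente_alt asignacion_actual var valor
instance (asignacion_actual : List (String × String)) (var : String) (valor : String) (out : Bool) : Decidable (Spec_es_consistente asignacion_actual var valor out) := by unfold Spec_es_consistente; infer_instance

-- ===== CLAIM (what is proved, stated in full; the proofs are below) =====
def Claim_equal_es_consistente : Prop := ∀ (asignacion_actual : List (String × String)) (var : String) (valor : String), Dom_es_consistente asignacion_actual var valor → Spec_es_consistente asignacion_actual var valor (es_consistente asignacion_actual var valor)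

-- ===== LEMMAS AND PROOFS =====

-- characterisation of B's loop: it returns true iff no key outside 'seen' that is
-- adjacent to var has 'valor' as its first-occurrence value in the remaining list
theorem esConsAltLoop_eq_true_iff (var valor : String) (s : PySem.Set String)
    (l : List (String × String)) :
    esConsAltLoop var valor s l = true ↔
      ∀ k v, (PySem.Dict.mk l).get? k = some v → k ∉ s →
        esArista var k = true → v ≠ valor := by
  induction l generalizing s with
  | nil =>
    simp [esConsAltLoop, PySem.Dict.get?]
  | cons p rest ih =>
    obtain ⟨k0, v0⟩ := p
    by_cases hs : k0 ∈ s
    · rw [show esConsAltLoop var valor s ((k0, v0) :: rest) = esConsAltLoop var valor s rest by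
        simp [esConsAltLoop, hs]]
      rw [ih]
      constructor
      · intro h k v hget hks he
        rw [PySem.Dict.get?_mk_cons] at hget
        by_cases hk : k = k0
        · exact absurd (hk ▸ hs) hks
        · have hb : (k0 == k) = false := beq_eq_false_iff_ne.mpr (Ne.symm hk)
          exact h k v (by simpa [hb] using hget) hks he
      · intro h k v hget hks he
        have hk : ¬ k = k0 := fun hkk => hks (hkk ▸ hs)
        have hb : (k0 == k) = false := beq_eq_false_iff_ne.mpr (Ne.symm hk)
        exact h k v (by rw [PySem.Dict.get?_mk_cons]; simpa [hb] using hget) hks he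
    · by_cases hm : (v0 == valor && esArista var k0) = true
      · obtain ⟨hv, he⟩ := Bool.and_eq_true_iff.mp hm
        have hv' : v0 = valor := by simpa using hv
        rw [show esConsAltLoop var valor s ((k0, v0) :: rest) = false by
          simp [esConsAltLoop, hs, hv', he]]
        simp only [Bool.false_eq_true, false_iff, not_forall]
        exact ⟨k0, v0, by rw [PySem.Dict.get?_mk_cons]; simp, hs, he, by simp [hv']⟩
      · have hm' : ¬ (v0 = valor ∧ esArista var k0 = true) := by
          intro ⟨h1, h2⟩; exact hm (by simp [h1, h2])
        rw [show esConsAltLoop var valor s ((k0, v0) :: rest)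
            = esConsAltLoop var valor (PySem.Set.add s k0) rest by
          simp only [esConsAltLoop]
          rw [if_neg (by simpa [PySem.Set.contains_iff] using hs), if_neg hm]]
        rw [ih]
        constructor
        · intro h k v hget hks he
          rw [PySem.Dict.get?_mk_cons] at hget
          by_cases hk : k = k0
          · subst hk
            have hv : v = v0 := by simpa using hget.symm
            subst hv
            exact fun hveq => hm' ⟨hveq, he⟩
          · have hb : (k0 == k) = false := beq_eq_false_iff_ne.mpr (Ne.symm hk)
            refine h k v (by simpa [hb] using hget) ?_ he
            rw [PySem.Set.mem_add]
            rintro (h1 | h2)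
            · exact hks h1
            · exact hk h2
        · intro h k v hget hks' he
          have hkns : k ∉ s := fun hmem => hks' ((PySem.Set.mem_add s k0 k).mpr (Or.inl hmem))
          have hk : ¬ k = k0 := fun hkk => hks' ((PySem.Set.mem_add s k0 k).mpr (Or.inr hkk))
          have hb : (k0 == k) = false := beq_eq_false_iff_ne.mpr (Ne.symm hk)
          exact h k v (by rw [PySem.Dict.get?_mk_cons]; simpa [hb] using hget) hkns he

-- esArista identifies the neighbours in the fixed triangle
theorem esArista_A (k : String) : esArista "A" k = true ↔ k = "B" ∨ k = "C" := by
  simp [esArista, aristas, restriccionesVecinos, PySem.Set.ofList]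
theorem esArista_B (k : String) : esArista "B" k = true ↔ k = "A" ∨ k = "C" := by
  simp [esArista, aristas, restriccionesVecinos, PySem.Set.ofList]
  exact or_comm
theorem esArista_C (k : String) : esArista "C" k = true ↔ k = "A" ∨ k = "B" := by
  simp [esArista, aristas, restriccionesVecinos, PySem.Set.ofList]
  exact or_comm
theorem esArista_other (var k : String) (hA : var ≠ "A") (hB : var ≠ "B") (hC : var ≠ "C") :
    esArista var k = false := by
  rcases h : esArista var k
  · rfl
  · exfalso
    simp [esArista, aristas, restriccionesVecinos, PySem.Set.ofList] at h
    rcases h with (h | h) <;> simp_all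

-- 'y in asignacion_actual' is the same test as 'asignacion_actual.get(y) is not None'
theorem contains_eq_isSome (d : PySem.Dict String String) (k : String) :
    d.contains k = (d.get? k).isSome := by
  rcases hb : d.contains k
  · rw [← PySem.Dict.get?_eq_none_iff_contains] at hb; simp [hb]
  · rcases h : d.get? k with _ | v
    · rw [PySem.Dict.get?_eq_none_iff_contains] at h; simp [h] at hb
    · rfl

-- B's result, characterised through lookups of the two neighbours of var (or trivially true)
theorem alt_char (asig : List (String × String)) (var valor : String) :
    es_consistente_alt asig var valor = true ↔
      ∀ k, esArista var k = true → (PySem.Dict.mk asig).get? k ≠ some valor := by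
  rw [es_consistente_alt, esConsAltLoop_eq_true_iff]
  constructor
  · intro h k he hget
    exact h k valor hget (by simp [PySem.Set.empty]) he rfl
  · intro h k v hget _ he hv
    exact h k he (hv ▸ hget)

-- ===== VERDICT (by name: the statement is the Claim_ definition above) =====
theorem es_consistente_spec : Claim_equal_es_consistente := by
  intro asig var valor _
  unfold Spec_es_consistente
  rw [Bool.eq_iff_iff, alt_char]
  unfold es_consistente restriccionesVecinos
  set d := PySem.Dict.mk asig with hd
  by_cases hA : var = "A"
  · subst hA
    have hchar : (∀ k, esArista "A" k = true → d.get? k ≠ some valor) ↔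
        (d.get? "B" ≠ some valor ∧ d.get? "C" ≠ some valor) := by
      constructor
      · intro h
        exact ⟨h "B" ((esArista_A "B").mpr (Or.inl rfl)),
               h "C" ((esArista_A "C").mpr (Or.inr rfl))⟩
      · rintro ⟨h1, h2⟩ k hk
        rcases (esArista_A k).mp hk with h | h <;> subst h <;> assumption
    rw [hchar]
    by_cases h1 : d.get? "B" = some valor <;> by_cases h2 : d.get? "C" = some valor <;>
      simp [esConsLoop, contains_eq_isSome, h1, h2]
  by_cases hBv : var = "B"
  · subst hBv
    have hchar : (∀ k, esArista "B" k = true → d.get? k ≠ some valor) ↔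
        (d.get? "A" ≠ some valor ∧ d.get? "C" ≠ some valor) := by
      constructor
      · intro h
        exact ⟨h "A" ((esArista_B "A").mpr (Or.inl rfl)),
               h "C" ((esArista_B "C").mpr (Or.inr rfl))⟩
      · rintro ⟨h1, h2⟩ k hk
        rcases (esArista_B k).mp hk with h | h <;> subst h <;> assumption
    rw [hchar]
    by_cases h1 : d.get? "A" = some valor <;> by_cases h2 : d.get? "C" = some valor <;>
      simp [esConsLoop, contains_eq_isSome, h1, h2]
  by_cases hCv : var = "C"
  · subst hCv
    have hchar : (∀ k, esArista "C" k = true → d.get? k ≠ some valor) ↔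
        (d.get? "A" ≠ some valor ∧ d.get? "B" ≠ some valor) := by
      constructor
      · intro h
        exact ⟨h "A" ((esArista_C "A").mpr (Or.inl rfl)),
               h "B" ((esArista_C "B").mpr (Or.inr rfl))⟩
      · rintro ⟨h1, h2⟩ k hk
        rcases (esArista_C k).mp hk with h | h <;> subst h <;> assumption
    rw [hchar]
    by_cases h1 : d.get? "A" = some valor <;> by_cases h2 : d.get? "B" = some valor <;>
      simp [esConsLoop, contains_eq_isSome, h1, h2]
  · have hvac : ∀ k, esArista var k = true → d.get? k ≠ some valor := by
      intro k hk
      rw [esArista_other var k hA hBv hCv] at hk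
      exact absurd hk (by simp)
    constructor
    · intro _ k hk
      exact hvac k hk
    · intro _
      simp [esConsLoop, Ne.symm hA, Ne.symm hBv, Ne.symm hCv]
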